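-- pv_equiv track=rewrite | github.com/abe6/Timetabler | logic/logic.py | count_days
-- ===== SOURCE A (Python) =====
-- def count_days(week):
--     days = {}
--     for session in week:
--         current = days.get(session["day"]) # The existing result for that day
--         new_count = current["count"] + 1 if (current != None) else 1
--         new_score = current["score"] + session["score"] if (current != None) else session["score"]
--
--         # Update
--         days[session["day"]] = {"count": new_count, "score": new_score}
--     return days
-- ===== SOURCE B (Python) =====
-- def count_days(week):
--     # Pass 1: distinct days in first-occurrence order; pass 2: per-day scans.
--     order = []
--     for session in week:
--         if session["day"] not in order:
--             order.append(session["day"])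
--     return {
--         day: {
--             "count": len([s for s in week if s["day"] == day]),
--             "score": sum(s["score"] for s in week if s["day"] == day),
--         }
--         for day in order
--     }
-- ===== Notes on version B (the rewrite author's own statement) =====
-- stated objective: alternative
-- what changed: Replaces A's single running dict-update loop by a two-phase strategy: first collect the distinct days in first-occurrence order, then build the whole result in one dict comprehension with a per-day scan computing count and score.
import Mathlib
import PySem

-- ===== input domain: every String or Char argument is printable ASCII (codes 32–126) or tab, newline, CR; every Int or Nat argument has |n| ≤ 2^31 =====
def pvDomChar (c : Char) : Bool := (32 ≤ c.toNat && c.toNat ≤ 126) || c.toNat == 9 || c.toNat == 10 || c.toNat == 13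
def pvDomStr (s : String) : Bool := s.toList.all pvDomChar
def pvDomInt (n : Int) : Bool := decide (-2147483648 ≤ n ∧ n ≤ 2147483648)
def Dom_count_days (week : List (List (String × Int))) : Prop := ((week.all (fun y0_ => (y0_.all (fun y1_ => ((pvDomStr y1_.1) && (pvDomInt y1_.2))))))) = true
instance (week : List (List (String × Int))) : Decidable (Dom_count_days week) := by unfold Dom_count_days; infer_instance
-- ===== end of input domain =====

-- B replaces A's single running dict-update loop by a two-phase strategy (distinct days
-- in first-occurrence order, then a per-day scan building the result dict); same values.

-- shared field accessor: session[k] for a session dict (0 is an unreachable default: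
-- Pre_count_days guarantees the key is present, matching Python's KeyError otherwise)
def pvField (session : List (String × Int)) (k : String) : Int :=
  ((PySem.Dict.mk session).get? k).getD 0

-- ===== PORT A =====
def count_days (week : List (List (String × Int))) : List (Int × List (String × Int)) :=
  (week.foldl
    (fun days session =>
      let current := days.get? (pvField session "day")
      let newCount : Int := match current with
        | some cur => ((PySem.Dict.mk cur).get? "count").getD 0 + 1
        | none => 1
      let newScore : Int := match current with
        | some cur => ((PySem.Dict.mk cur).get? "score").getD 0 + pvField session "score"
        | none => pvField session "score"
      days.insert (pvField session "day") [("count", newCount), ("score", newScore)])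
    PySem.Dict.empty).items

-- ===== PORT B =====
def count_days_alt (week : List (List (String × Int))) : List (Int × List (String × Int)) :=
  let order : List Int := week.foldl
    (fun order session =>
      if pvField session "day" ∈ order then order else order ++ [pvField session "day"]) []
  order.map (fun day =>
    (day, [("count", ((week.filter (fun s => pvField s "day" == day)).length : Int)),
           ("score", ((week.filter (fun s => pvField s "day" == day)).map
                        (fun s => pvField s "score")).sum)]))

-- ===== PRECONDITION & SPEC =====
-- Pre_: every session has the keys "day" and "score" (Python A raises KeyError otherwise).
def Pre_count_days (week : List (List (String × Int))) : Prop :=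
  ∀ s ∈ week, ((PySem.Dict.mk s).contains "day") = true ∧ ((PySem.Dict.mk s).contains "score") = true
instance (week : List (List (String × Int))) : Decidable (Pre_count_days week) := by
  unfold Pre_count_days; infer_instance
def pvWitness_count_days : (List (List (String × Int))) :=
  [[("day", 1), ("score", 4)], [("day", 2), ("score", 5)], [("day", 1), ("score", -3)]]

def Spec_count_days (week : List (List (String × Int))) (out : List (Int × List (String × Int))) : Prop := out = count_days_alt week
instance (week : List (List (String × Int))) (out : List (Int × List (String × Int))) : Decidable (Spec_count_days week out) := by unfold Spec_count_days; infer_instance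

-- ===== CLAIM (what is proved, stated in full; the proofs are below) =====
def Claim_equal_count_days : Prop := ∀ (week : List (List (String × Int))), Dom_count_days week → Pre_count_days week → Spec_count_days week (count_days week)

-- ===== LEMMAS AND PROOFS =====

-- abbreviations for the proofs
def pvKey (s : List (String × Int)) : Int := pvField s "day"
def pvSc (s : List (String × Int)) : Int := pvField s "score"
def pvVal (l : List (List (String × Int))) (d : Int) : List (String × Int) :=
  [("count", ((l.filter (fun s => pvField s "day" == d)).length : Int)),
   ("score", ((l.filter (fun s => pvField s "day" == d)).map (fun s => pvField s "score")).sum)]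
def pvOrder (l : List (List (String × Int))) : List Int :=
  l.foldl (fun o s => if pvField s "day" ∈ o then o else o ++ [pvField s "day"]) []
def pvStep (days : PySem.Dict Int (List (String × Int))) (session : List (String × Int)) :
    PySem.Dict Int (List (String × Int)) :=
  let current := days.get? (pvField session "day")
  let newCount : Int := match current with
    | some cur => ((PySem.Dict.mk cur).get? "count").getD 0 + 1
    | none => 1
  let newScore : Int := match current with
    | some cur => ((PySem.Dict.mk cur).get? "score").getD 0 + pvField session "score"
    | none => pvField session "score"
  days.insert (pvField session "day") [("count", newCount), ("score", newScore)]

theorem count_days_eq_loop (week : List (List (String × Int))) :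
    count_days week = (week.foldl pvStep PySem.Dict.empty).items := rfl

theorem count_days_alt_eq (week : List (List (String × Int))) :
    count_days_alt week = (pvOrder week).map (fun d => (d, pvVal week d)) := rfl

theorem mem_order_fold (l : List (List (String × Int))) :
    ∀ (acc : List Int) (x : Int),
      x ∈ l.foldl (fun o s => if pvField s "day" ∈ o then o else o ++ [pvField s "day"]) acc ↔
        x ∈ acc ∨ ∃ s ∈ l, pvField s "day" = x := by
  induction l with
  | nil => simp [List.foldl]
  | cons hd tl ih =>
    intro acc x
    simp only [List.foldl_cons]
    rw [ih]
    by_cases h : pvField hd "day" ∈ acc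
    · rw [if_pos h]
      constructor
      · rintro (hx | ⟨s, hs, he⟩)
        · exact Or.inl hx
        · exact Or.inr ⟨s, List.mem_cons_of_mem _ hs, he⟩
      · rintro (hx | ⟨s, hs, he⟩)
        · exact Or.inl hx
        · rcases List.mem_cons.mp hs with rfl | hs'
          · exact Or.inl (he ▸ h)
          · exact Or.inr ⟨s, hs', he⟩
    · rw [if_neg h]
      constructor
      · rintro (hx | ⟨s, hs, he⟩)
        · rcases List.mem_append.mp hx with hx' | hx'
          · exact Or.inl hx'
          · exact Or.inr ⟨hd, List.mem_cons_self, (List.mem_singleton.mp hx').symm⟩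
        · exact Or.inr ⟨s, List.mem_cons_of_mem _ hs, he⟩
      · rintro (hx | ⟨s, hs, he⟩)
        · exact Or.inl (List.mem_append.mpr (Or.inl hx))
        · rcases List.mem_cons.mp hs with rfl | hs'
          · exact Or.inl (List.mem_append.mpr (Or.inr (List.mem_singleton.mpr he.symm)))
          · exact Or.inr ⟨s, hs', he⟩

theorem mem_pvOrder (l : List (List (String × Int))) (x : Int) :
    x ∈ pvOrder l ↔ ∃ s ∈ l, pvField s "day" = x := by
  unfold pvOrder; rw [mem_order_fold]; simp

theorem pvOrder_append (l : List (List (String × Int))) (s : List (String × Int)) :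
    pvOrder (l ++ [s]) =
      if pvField s "day" ∈ pvOrder l then pvOrder l else pvOrder l ++ [pvField s "day"] := by
  unfold pvOrder; rw [List.foldl_append]; rfl

theorem get?_mk_map (ds : List Int) (f : Int → List (String × Int)) (k : Int) :
    (PySem.Dict.mk (ds.map (fun d => (d, f d)))).get? k =
      if k ∈ ds then some (f k) else none := by
  induction ds with
  | nil => simp [PySem.Dict.get?]
  | cons d tl ih =>
    rw [List.map_cons, PySem.Dict.get?_mk_cons, ih]
    by_cases h : d = k
    · subst h; simp
    · simp [h, Ne.symm h]

theorem pvVal_append_ne (l : List (List (String × Int))) (s : List (String × Int)) (d : Int)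
    (h : pvField s "day" ≠ d) : pvVal (l ++ [s]) d = pvVal l d := by
  unfold pvVal
  simp [List.filter_append, h]

theorem pvVal_append_eq (l : List (List (String × Int))) (s : List (String × Int)) :
    pvVal (l ++ [s]) (pvField s "day") =
      [("count", ((l.filter (fun s' => pvField s' "day" == pvField s "day")).length : Int) + 1),
       ("score", ((l.filter (fun s' => pvField s' "day" == pvField s "day")).map
                    (fun s' => pvField s' "score")).sum + pvField s "score")] := by
  unfold pvVal
  simp [List.filter_append]

theorem filter_eq_nil_of_not_mem (l : List (List (String × Int))) (k : Int)
    (h : ∀ s ∈ l, pvField s "day" ≠ k) :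
    l.filter (fun s' => pvField s' "day" == k) = [] := by
  rw [List.filter_eq_nil_iff]
  intro s hs
  simpa using h s hs

theorem loop_invariant (l : List (List (String × Int))) :
    (l.foldl pvStep PySem.Dict.empty).items = (pvOrder l).map (fun d => (d, pvVal l d)) := by
  induction l using List.reverseRecOn with
  | nil => rfl
  | append_singleton l s ih =>
    have hmk : l.foldl pvStep PySem.Dict.empty
        = PySem.Dict.mk ((pvOrder l).map (fun d => (d, pvVal l d))) := by
      apply PySem.Dict.ext; exact ih
    rw [List.foldl_append, List.foldl_cons, List.foldl_nil, pvOrder_append, hmk]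
    by_cases hmem : pvField s "day" ∈ pvOrder l
    · -- the day is already present: insert overwrites in place
      rw [if_pos hmem]
      have hget : (PySem.Dict.mk ((pvOrder l).map (fun d => (d, pvVal l d)))).get? (pvField s "day")
          = some (pvVal l (pvField s "day")) := by rw [get?_mk_map, if_pos hmem]
      show (PySem.Dict.insert _ (pvField s "day") _).items = _
      rw [hget]
      have hcont : (PySem.Dict.mk ((pvOrder l).map (fun d => (d, pvVal l d)))).contains
          (pvField s "day") = true := by
        rw [PySem.Dict.contains_eq_isSome_get?, hget]; rfl
      rw [PySem.Dict.items_insert_of_contains _ _ hcont]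
      show ((pvOrder l).map (fun d => (d, pvVal l d))).map _ = _
      rw [List.map_map]
      apply List.map_congr_left
      intro d _hd
      simp only [Function.comp_apply]
      by_cases hdk : d = pvField s "day"
      · subst hdk
        rw [if_pos (by simp), pvVal_append_eq]
        unfold pvVal
        simp [PySem.Dict.get?_mk_cons]
      · rw [if_neg (by simpa using hdk),
            pvVal_append_ne l s d (fun he => hdk he.symm)]
    · -- fresh day: insert appends
      rw [if_neg hmem]
      have hget : (PySem.Dict.mk ((pvOrder l).map (fun d => (d, pvVal l d)))).get? (pvField s "day")
          = none := by rw [get?_mk_map, if_neg hmem]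
      show (PySem.Dict.insert _ (pvField s "day") _).items = _
      rw [hget]
      have hcont : (PySem.Dict.mk ((pvOrder l).map (fun d => (d, pvVal l d)))).contains
          (pvField s "day") = false := by
        rw [PySem.Dict.contains_eq_isSome_get?, hget]; rfl
      rw [PySem.Dict.items_insert_of_not_contains _ _ hcont]
      rw [List.map_append]
      congr 1
      · apply List.map_congr_left
        intro d hd
        have hdk : pvField s "day" ≠ d := fun he => hmem (he ▸ hd)
        rw [pvVal_append_ne l s d hdk]
      · have hnil : l.filter (fun s' => pvField s' "day" == pvField s "day") = [] := by
          apply filter_eq_nil_of_not_mem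
          intro s' hs' he
          exact hmem ((mem_pvOrder l (pvField s "day")).mpr ⟨s', hs', he⟩)
        rw [List.map_singleton, pvVal_append_eq, hnil]
        simp

-- ===== VERDICT (by name: the statement is the Claim_ definition above) =====
theorem count_days_spec : Claim_equal_count_days := by
  intro week _hdom _hpre
  show count_days week = count_days_alt week
  rw [count_days_eq_loop, count_days_alt_eq, loop_invariant]
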